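-- pv_equiv track=rewrite | github.com/trungviet17/VLSP_Legal_Document_Retrieval | src/core/chunking/pydamic_chunking.py | chunk_gen
-- ===== SOURCE A (Python) =====
-- def chunk_gen(indices_above_thresh, sentences):
--     start_index = 0
--     chunks = []
--     chunks_len = []
--
--     for index in indices_above_thresh:
--         end_index = index
--         group = sentences[start_index:end_index + 1]
--         combined_text = ' '.join([d['sentence'] for d in group])
--         chunks.append(combined_text)
--         chunks_len.append(len(combined_text))
--
--         start_index = index + 1
--
--     if start_index < len(sentences):
--         combined_text = ' '.join([d['sentence'] for d in sentences[start_index:]])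
--         chunks.append(combined_text)
--         chunks_len.append(len(combined_text))
--
--     return chunks, chunks_len
-- ===== SOURCE B (Python) =====
-- def chunk_gen(indices_above_thresh, sentences):
--     idxs = list(indices_above_thresh)
--
--     def piece(group):
--         text = ' '.join(d['sentence'] for d in group)
--         return (text, len(text))
--
--     def build(start, lo, hi):
--         # (text, len) pairs for the chunks delimited by idxs[lo:hi], divide and conquer
--         if hi - lo == 0:
--             return []
--         if hi - lo == 1:
--             return [piece(sentences[start:idxs[lo] + 1])]
--         mid = (lo + hi) // 2
--         return build(start, lo, mid) + build(idxs[mid - 1] + 1, mid, hi)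
--
--     pairs = build(0, 0, len(idxs))
--     tail_start = idxs[-1] + 1 if idxs else 0
--     if tail_start < len(sentences):
--         pairs.append(piece(sentences[tail_start:]))
--     return [t for t, _ in pairs], [n for _, n in pairs]
-- ===== Notes on version B (the rewrite author's own statement) =====
-- stated objective: alternative
-- what changed: Replaces A's single left-to-right loop carrying a running start_index and two parallel accumulators with a divide-and-conquer recursion over the index list (the right half's start is read directly from the index before the split point), producing (text,len) pairs that are unzipped at the end; the tail chunk is appended once after the recursion.
import Mathlib
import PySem

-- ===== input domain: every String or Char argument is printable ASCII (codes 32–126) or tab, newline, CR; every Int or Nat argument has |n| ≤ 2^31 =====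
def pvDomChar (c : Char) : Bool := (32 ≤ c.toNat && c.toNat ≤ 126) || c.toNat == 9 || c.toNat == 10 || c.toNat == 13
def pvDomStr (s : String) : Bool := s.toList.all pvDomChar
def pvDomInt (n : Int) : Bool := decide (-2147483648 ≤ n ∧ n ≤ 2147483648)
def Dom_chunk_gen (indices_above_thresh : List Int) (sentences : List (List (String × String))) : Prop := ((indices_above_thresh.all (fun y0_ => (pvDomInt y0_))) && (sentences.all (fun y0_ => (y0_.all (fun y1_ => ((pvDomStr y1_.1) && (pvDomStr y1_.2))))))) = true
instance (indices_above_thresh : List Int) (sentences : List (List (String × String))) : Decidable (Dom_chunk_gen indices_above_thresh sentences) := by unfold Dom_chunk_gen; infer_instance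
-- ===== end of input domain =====

-- B replaces A's running-index loop with a divide-and-conquer recursion producing (text,len)
-- pairs that are unzipped at the end; objective: alternative decomposition, similar cost.

-- ===== PORT A =====
-- ' '.join([d['sentence'] for d in group]); d['sentence'] would raise KeyError on a
-- missing key (excluded by Pre_), here totalized with default "".
def pvJoinGroup (group : List (List (String × String))) : String :=
  PySem.Str.join " " (group.map (fun d => PySem.Dict.getD (PySem.Dict.mk d) "sentence" ""))

def chunk_gen (indices_above_thresh : List Int) (sentences : List (List (String × String))) : List String × List Int :=
  -- for index in indices_above_thresh: slice, join, append; start_index := index + 1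
  let st := indices_above_thresh.foldl
    (fun (st : Int × List String × List Int) (index : Int) =>
      let combined_text := pvJoinGroup (PySem.List.slice sentences (some st.1) (some (index + 1)))
      (index + 1, st.2.1 ++ [combined_text], st.2.2 ++ [PySem.Str.len combined_text]))
    (0, [], [])
  -- if start_index < len(sentences): append the tail chunk sentences[start_index:]
  if st.1 < (sentences.length : Int) then
    let combined_text := pvJoinGroup (PySem.List.slice sentences (some st.1) none)
    (st.2.1 ++ [combined_text], st.2.2 ++ [PySem.Str.len combined_text])
  else
    (st.2.1, st.2.2)

-- ===== PORT B =====
-- piece(group): the (text, len(text)) pair of one chunk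
def pvPiece (group : List (List (String × String))) : String × Int :=
  let text := pvJoinGroup group
  (text, PySem.Str.len text)

-- build(start, lo, hi): pairs for the chunks delimited by idxs[lo:hi], divide and conquer
def pvBuild (sentences : List (List (String × String))) (idxs : List Int)
    (start : Int) (lo hi : Nat) : List (String × Int) :=
  if hi - lo = 0 then []
  else if hi - lo = 1 then
    [pvPiece (PySem.List.slice sentences (some start) (some (idxs.getD lo 0 + 1)))]
  else
    let mid := (lo + hi) / 2
    pvBuild sentences idxs start lo mid ++
      pvBuild sentences idxs (idxs.getD (mid - 1) 0 + 1) mid hi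
termination_by hi - lo
decreasing_by all_goals omega

def chunk_gen_alt (indices_above_thresh : List Int) (sentences : List (List (String × String))) : List String × List Int :=
  let idxs := indices_above_thresh
  let pairs0 := pvBuild sentences idxs 0 0 idxs.length
  -- tail_start = idxs[-1] + 1 if idxs else 0
  let tail_start : Int := if idxs.isEmpty then 0 else idxs.getLast! + 1
  let pairs := if tail_start < (sentences.length : Int)
               then pairs0 ++ [pvPiece (PySem.List.slice sentences (some tail_start) none)]
               else pairs0
  (pairs.map Prod.fst, pairs.map Prod.snd)

-- ===== PRECONDITION & SPEC =====
-- Pre_ excludes sentences containing a dict without the key 'sentence', on which A raises KeyError.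
def Pre_chunk_gen (indices_above_thresh : List Int) (sentences : List (List (String × String))) : Prop :=
  ∀ d ∈ sentences, d.any (fun p => p.1 == "sentence") = true
instance (indices_above_thresh : List Int) (sentences : List (List (String × String))) : Decidable (Pre_chunk_gen indices_above_thresh sentences) := by unfold Pre_chunk_gen; infer_instance

def pvWitness_chunk_gen : List Int × (List (List (String × String))) :=
  ([0], [[("sentence", "a")], [("sentence", "b c")]])

def Spec_chunk_gen (indices_above_thresh : List Int) (sentences : List (List (String × String))) (out : List String × List Int) : Prop := out = chunk_gen_alt indices_above_thresh sentences
instance (indices_above_thresh : List Int) (sentences : List (List (String × String))) (out : List String × List Int) : Decidable (Spec_chunk_gen indices_above_thresh sentences out) := by unfold Spec_chunk_gen; infer_instance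

-- ===== CLAIM (what is proved, stated in full; the proofs are below) =====
def Claim_equal_chunk_gen : Prop := ∀ (indices_above_thresh : List Int) (sentences : List (List (String × String))), Dom_chunk_gen indices_above_thresh sentences → Pre_chunk_gen indices_above_thresh sentences → Spec_chunk_gen indices_above_thresh sentences (chunk_gen indices_above_thresh sentences)

-- ===== LEMMAS AND PROOFS =====

-- Proof-only names for A's loop body and post-loop finish (definitionally the body of chunk_gen).
def pvStep (sentences : List (List (String × String))) (st : Int × List String × List Int) (index : Int) : Int × List String × List Int :=
  let c := pvJoinGroup (PySem.List.slice sentences (some st.1) (some (index + 1)))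
  (index + 1, st.2.1 ++ [c], st.2.2 ++ [PySem.Str.len c])

def pvFinish (sentences : List (List (String × String))) (st : Int × List String × List Int) : List String × List Int :=
  if st.1 < (sentences.length : Int) then
    let c := pvJoinGroup (PySem.List.slice sentences (some st.1) none)
    (st.2.1 ++ [c], st.2.2 ++ [PySem.Str.len c])
  else
    (st.2.1, st.2.2)

-- Linear reference: the (text,len) pairs of the indexed (non-tail) chunks.
def pvLin (sentences : List (List (String × String))) : Int → List Int → List (String × Int)
  | _, [] => []
  | s, i :: rest =>
      pvPiece (PySem.List.slice sentences (some s) (some (i + 1))) :: pvLin sentences (i + 1) rest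

-- All pairs including the guarded tail chunk.
def pvPairs (sentences : List (List (String × String))) (s : Int) (l : List Int) : List (String × Int) :=
  let ts : Int := match l with | [] => s | _ => l.getLast! + 1
  pvLin sentences s l ++
    (if ts < (sentences.length : Int)
     then [pvPiece (PySem.List.slice sentences (some ts) none)] else [])

lemma pvGetLast!_cons_cons (a b : Int) (l : List Int) : (a :: b :: l).getLast! = (b :: l).getLast! := by
  simp [List.getLast!]

lemma pvPairs_cons (sentences : List (List (String × String))) (s i : Int) (rest : List Int) :
    pvPairs sentences s (i :: rest) =
      pvPiece (PySem.List.slice sentences (some s) (some (i + 1))) :: pvPairs sentences (i + 1) rest := by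
  cases rest with
  | nil => simp [pvPairs, pvLin]
  | cons j r => simp [pvPairs, pvLin]

-- A's loop+finish computes exactly the unzipped pvPairs.
lemma pvLoop_eq (sentences : List (List (String × String))) :
    ∀ (l : List Int) (s : Int) (cs : List String) (ls : List Int),
    pvFinish sentences (l.foldl (pvStep sentences) (s, cs, ls)) =
      (cs ++ (pvPairs sentences s l).map Prod.fst, ls ++ (pvPairs sentences s l).map Prod.snd) := by
  intro l
  induction l with
  | nil =>
    intro s cs ls
    simp only [List.foldl_nil, pvFinish, pvPairs, pvLin]
    split_ifs with h
    · simp [pvPiece]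
    · simp
  | cons i rest ih =>
    intro s cs ls
    rw [List.foldl_cons]
    show pvFinish sentences (rest.foldl (pvStep sentences)
      (i + 1, cs ++ [pvJoinGroup (PySem.List.slice sentences (some s) (some (i + 1)))],
        ls ++ [PySem.Str.len (pvJoinGroup (PySem.List.slice sentences (some s) (some (i + 1))))])) = _
    rw [ih, pvPairs_cons]
    simp [pvPiece]

-- pvLin splits on append, the second part starting after the last index of the first.
lemma pvLin_append (sentences : List (List (String × String))) (l₁ : List Int) :
    ∀ (l₂ : List Int) (s : Int), l₁ ≠ [] →
    pvLin sentences s (l₁ ++ l₂) =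
      pvLin sentences s l₁ ++ pvLin sentences (l₁.getLast! + 1) l₂ := by
  induction l₁ with
  | nil => intro _ _ h; exact absurd rfl h
  | cons i rest ih =>
    intro l₂ s _
    cases rest with
    | nil => simp [pvLin, List.getLast!]
    | cons j r =>
      have h := ih l₂ (i + 1) (by simp)
      show pvPiece (PySem.List.slice sentences (some s) (some (i + 1))) ::
            pvLin sentences (i + 1) ((j :: r) ++ l₂) =
          pvLin sentences s (i :: j :: r) ++ pvLin sentences ((i :: j :: r).getLast! + 1) l₂
      rw [h, pvGetLast!_cons_cons]
      rfl

-- The divide-and-conquer build equals the linear reference on the segment idxs[lo:hi].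
lemma pvBuild_eq (sentences : List (List (String × String))) (idxs : List Int) :
    ∀ (n lo hi : Nat) (start : Int), hi - lo ≤ n → hi ≤ idxs.length →
    pvBuild sentences idxs start lo hi = pvLin sentences start ((idxs.drop lo).take (hi - lo)) := by
  intro n
  induction n with
  | zero =>
    intro lo hi start hle _
    have h0 : hi - lo = 0 := by omega
    rw [pvBuild, if_pos h0, h0]
    simp [pvLin]
  | succ n ih =>
    intro lo hi start hle hhi
    by_cases h0 : hi - lo = 0
    · rw [pvBuild, if_pos h0, h0]; simp [pvLin]
    · by_cases h1 : hi - lo = 1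
      · rw [pvBuild, if_neg h0, if_pos h1, h1]
        have hlo : lo < idxs.length := by omega
        have : (idxs.drop lo).take 1 = [idxs.getD lo 0] := by
          have hdrop : idxs.drop lo = idxs[lo] :: idxs.drop (lo + 1) := List.drop_eq_getElem_cons hlo
          rw [hdrop, List.take_succ_cons, List.take_zero, List.getD_eq_getElem idxs 0 hlo]
        rw [this]
        simp [pvLin]
      · rw [pvBuild, if_neg h0, if_neg h1]
        have hmid1 : lo < (lo + hi) / 2 := by omega
        have hmid2 : (lo + hi) / 2 < hi := by omega
        show pvBuild sentences idxs start lo ((lo + hi) / 2) ++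
            pvBuild sentences idxs (idxs.getD ((lo + hi) / 2 - 1) 0 + 1) ((lo + hi) / 2) hi =
          pvLin sentences start ((idxs.drop lo).take (hi - lo))
        generalize hm : (lo + hi) / 2 = mid at hmid1 hmid2 ⊢
        have e1 := ih lo mid start (by omega) (by omega)
        have e2 := ih mid hi (idxs.getD (mid - 1) 0 + 1) (by omega) hhi
        rw [e1, e2]
        have hseg : (idxs.drop lo).take (hi - lo) =
            (idxs.drop lo).take (mid - lo) ++ (idxs.drop mid).take (hi - mid) := by
          rw [← List.take_append_drop (mid - lo) ((idxs.drop lo).take (hi - lo))]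
          congr 1
          · rw [List.take_take]; congr 1; omega
          · rw [List.drop_take, List.drop_drop]
            have h3 : lo + (mid - lo) = mid := by omega
            have h4 : hi - lo - (mid - lo) = hi - mid := by omega
            rw [h3, h4]
        rw [hseg]
        have hne : (idxs.drop lo).take (mid - lo) ≠ [] := by
          have : ((idxs.drop lo).take (mid - lo)).length = mid - lo := by
            simp; omega
          intro h; rw [h] at this; simp at this; omega
        rw [pvLin_append sentences _ _ _ hne]
        -- last of the taken segment is idxs[mid-1], i.e. idxs.getD (mid-1) 0
        have hlt : mid - 1 < idxs.length := by omega
        have hlast : ((idxs.drop lo).take (mid - lo)).getLast! = idxs.getD (mid - 1) 0 := by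
          have hlen : ((idxs.drop lo).take (mid - lo)).length = mid - lo := by simp; omega
          have hidx : mid - lo - 1 < ((idxs.drop lo).take (mid - lo)).length := by omega
          rw [List.getLast!_eq_getLast?_getD, List.getLast?_eq_getElem?, hlen,
              List.getElem?_eq_getElem hidx]
          simp only [Option.getD_some, List.getElem_take, List.getElem_drop]
          rw [List.getD_eq_getElem idxs 0 hlt]
          simp only [show lo + (mid - lo - 1) = mid - 1 from by omega]
        rw [hlast]

-- B's full pair list is pvPairs 0 idxs.
lemma pvAlt_pairs (sentences : List (List (String × String))) (idxs : List Int) :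
    chunk_gen_alt idxs sentences =
      ((pvPairs sentences 0 idxs).map Prod.fst, (pvPairs sentences 0 idxs).map Prod.snd) := by
  cases idxs with
  | nil =>
    have hb : pvBuild sentences [] 0 0 0 = [] := by rw [pvBuild]; norm_num
    simp [chunk_gen_alt, hb, pvPairs, pvLin, apply_ite]
    cases sentences <;> simp
  | cons i rest =>
    have hbuild := pvBuild_eq sentences (i :: rest) (i :: rest).length 0 (i :: rest).length 0
      (by omega) (le_refl _)
    simp only [List.drop_zero, Nat.sub_zero, List.take_length] at hbuild
    have hts : (if (i :: rest).isEmpty then (0 : Int) else (i :: rest).getLast! + 1)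
        = (i :: rest).getLast! + 1 := by simp
    simp only [chunk_gen_alt, hbuild, hts, pvPairs]
    split_ifs <;> simp

-- ===== VERDICT (by name: the statement is the Claim_ definition above) =====
theorem chunk_gen_spec : Claim_equal_chunk_gen := by
  intro idx sents _ _
  show pvFinish sents (idx.foldl (pvStep sents) (0, [], [])) = chunk_gen_alt idx sents
  rw [pvLoop_eq, pvAlt_pairs]
  simp
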